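-- pv_equiv track=rewrite | github.com/stablemaverick/tape-film-ichoose | app/rules/harmonization_rules.py | pick_best_release_date
-- ===== SOURCE A (Python) =====
-- from typing import Any, Dict, List, Optional
--
-- def _clean(value: Any) -> Optional[str]:
--     if value is None:
--         return None
--     text = str(value).strip()
--     return text if text else None
--
-- def _supplier_map(group: List[Dict[str, Any]]) -> Dict[str, Dict[str, Any]]:
--     return {(_clean(r.get("supplier")) or "").lower(): r for r in group}
--
-- def pick_best_release_date(group: List[Dict[str, Any]]) -> Optional[str]:
--     """Lasgo release date wins if present (trusted daily source), else Moovies, else any."""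
--     by = _supplier_map(group)
--     lasgo = by.get("lasgo")
--     if lasgo and lasgo.get("media_release_date"):
--         return lasgo["media_release_date"]
--     moovies = by.get("moovies")
--     if moovies and moovies.get("media_release_date"):
--         return moovies["media_release_date"]
--     for row in group:
--         if row.get("media_release_date"):
--             return row["media_release_date"]
--     return None
-- ===== SOURCE B (Python) =====
-- def pick_best_release_date(group):
--     """Single pass: track last 'lasgo' row, last 'moovies' row, first dated row."""
--     last_lasgo = None
--     last_moovies = None
--     first_dated = None
--     for r in group:
--         supplier = r.get("supplier")
--         if supplier is None:
--             key = ""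
--         else:
--             key = str(supplier).strip().lower()
--         if key == "lasgo":
--             last_lasgo = r
--         elif key == "moovies":
--             last_moovies = r
--         if first_dated is None and r.get("media_release_date"):
--             first_dated = r
--     for row in (last_lasgo, last_moovies):
--         if row and row.get("media_release_date"):
--             return row["media_release_date"]
--     if first_dated is not None:
--         return first_dated["media_release_date"]
--     return None
-- ===== Notes on version B (the rewrite author's own statement) =====
-- stated objective: alternative
-- what changed: Replaced the supplier-keyed dict build plus separate lookups and a second scan with one pass over group that keeps three explicit accumulators (last 'lasgo' row, last 'moovies' row, first dated row) and decides afterwards.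
import Mathlib
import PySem

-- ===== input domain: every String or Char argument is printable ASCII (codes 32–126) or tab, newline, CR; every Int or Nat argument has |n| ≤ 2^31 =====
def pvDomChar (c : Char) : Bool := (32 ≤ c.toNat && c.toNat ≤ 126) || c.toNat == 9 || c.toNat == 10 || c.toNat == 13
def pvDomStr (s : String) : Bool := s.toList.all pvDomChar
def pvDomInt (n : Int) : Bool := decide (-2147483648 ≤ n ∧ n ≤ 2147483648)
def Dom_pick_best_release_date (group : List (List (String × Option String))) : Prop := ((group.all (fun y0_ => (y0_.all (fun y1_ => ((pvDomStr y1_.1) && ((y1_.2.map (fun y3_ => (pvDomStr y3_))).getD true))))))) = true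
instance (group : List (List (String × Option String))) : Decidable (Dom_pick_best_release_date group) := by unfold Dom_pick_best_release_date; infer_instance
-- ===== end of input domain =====

-- ===== PORT A =====
-- B replaces A's supplier-keyed dict (two lookups + a second scan) by one pass with three
-- explicit accumulators; equivalence of the return value is proved on the whole domain.

-- _clean(value): None stays None; otherwise strip, empty becomes None
def pvCleanA (v : Option String) : Option String :=
  match v with
  | none => none
  | some s => let t := PySem.Str.strip s; if t = "" then none else some t

-- (_clean(r.get("supplier")) or "").lower()
def pvKeyA (r : List (String × Option String)) : String :=
  PySem.Str.lower ((pvCleanA (Option.join ((PySem.Dict.mk r).get? "supplier"))).getD "")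

-- r.get("media_release_date") (missing key and stored None both give none)
def pvDateA (r : List (String × Option String)) : Option String :=
  Option.join ((PySem.Dict.mk r).get? "media_release_date")

-- Python truthiness of an Optional[str]
def pvTruthyA (o : Option String) : Bool :=
  match o with
  | none => false
  | some s => decide (s ≠ "")

-- 'row and row.get("media_release_date")' on an Optional row (empty dict is falsy)
def pvRowTruthyA (o : Option (List (String × Option String))) : Bool :=
  match o with
  | none => false
  | some r => decide (r ≠ []) && pvTruthyA (pvDateA r)

-- the final 'for row in group: if row.get("media_release_date"): return ...' loop
def pvLoopA : List (List (String × Option String)) → Option String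
  | [] => none
  | r :: rest => if pvTruthyA (pvDateA r) then pvDateA r else pvLoopA rest

def pick_best_release_date (group : List (List (String × Option String))) : Option String :=
  -- _supplier_map: dict comprehension, later rows overwrite earlier ones
  let by_ := group.foldl (fun d r => d.insert (pvKeyA r) r) (PySem.Dict.empty)
  let lasgo := (by_ : PySem.Dict String (List (String × Option String))).get? "lasgo"
  if pvRowTruthyA lasgo then lasgo.bind pvDateA   -- guard makes lasgo["media_release_date"] = its date
  else
    let moovies := by_.get? "moovies"
    if pvRowTruthyA moovies then moovies.bind pvDateA
    else pvLoopA group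

-- ===== PORT B =====
-- key of a row as B computes it: "" for missing/None supplier, else strip then lower
def pvKeyB (r : List (String × Option String)) : String :=
  match Option.join ((PySem.Dict.mk r).get? "supplier") with
  | none => ""
  | some s => PySem.Str.lower (PySem.Str.strip s)

def pvDateB (r : List (String × Option String)) : Option String :=
  Option.join ((PySem.Dict.mk r).get? "media_release_date")

def pvTruthyB (o : Option String) : Bool :=
  match o with
  | none => false
  | some s => decide (s ≠ "")

def pvRowOkB (o : Option (List (String × Option String))) : Bool :=
  match o with
  | none => false
  | some r => decide (r ≠ []) && pvTruthyB (pvDateB r)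

-- one loop iteration over the state (last_lasgo, last_moovies, first_dated)
def pvStepB (s : Option (List (String × Option String)) × Option (List (String × Option String)) × Option (List (String × Option String)))
    (r : List (String × Option String)) :
    Option (List (String × Option String)) × Option (List (String × Option String)) × Option (List (String × Option String)) :=
  let key := pvKeyB r
  let s1 := if key = "lasgo" then (some r, s.2.1, s.2.2)
            else if key = "moovies" then (s.1, some r, s.2.2)
            else s
  if s1.2.2 = none ∧ pvTruthyB (pvDateB r) then (s1.1, s1.2.1, some r) else s1

def pick_best_release_date_alt (group : List (List (String × Option String))) : Option String :=
  let s := group.foldl pvStepB (none, none, none)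
  if pvRowOkB s.1 then s.1.bind pvDateB
  else if pvRowOkB s.2.1 then s.2.1.bind pvDateB
  else match s.2.2 with
       | some r => pvDateB r
       | none => none

-- ===== PRECONDITION & SPEC =====
def Spec_pick_best_release_date (group : List (List (String × Option String))) (out : Option String) : Prop := out = pick_best_release_date_alt group
instance (group : List (List (String × Option String))) (out : Option String) : Decidable (Spec_pick_best_release_date group out) := by unfold Spec_pick_best_release_date; infer_instance

-- ===== CLAIM (what is proved, stated in full; the proofs are below) =====
def Claim_equal_pick_best_release_date : Prop := ∀ (group : List (List (String × Option String))), Dom_pick_best_release_date group → Spec_pick_best_release_date group (pick_best_release_date group)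

-- ===== LEMMAS AND PROOFS =====

theorem pvKeyA_eq_pvKeyB (r : List (String × Option String)) : pvKeyA r = pvKeyB r := by
  unfold pvKeyA pvKeyB pvCleanA
  cases Option.join ((PySem.Dict.mk r).get? "supplier") with
  | none => rfl
  | some s =>
      simp only
      split_ifs with h
      · rw [h]; rfl
      · rfl


-- the supplier dict built by A, looked up at k, is the last row of group with that key
theorem dict_get?_eq_find_rev (group : List (List (String × Option String)))
    (d : PySem.Dict String (List (String × Option String))) (k : String) :
    (group.foldl (fun d r => d.insert (pvKeyA r) r) d).get? k
      = (group.reverse.find? (fun r => pvKeyA r == k)).or (d.get? k) := by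
  induction group generalizing d with
  | nil => simp
  | cons r rest ih =>
      simp only [List.foldl_cons, List.reverse_cons, List.find?_append, ih]
      cases h : rest.reverse.find? (fun r => pvKeyA r == k) with
      | some v => simp
      | none =>
          simp only [Option.none_or, List.find?_cons, List.find?_nil]
          rw [PySem.Dict.get?_insert]
          by_cases hk : pvKeyA r = k
          · have hk' : (pvKeyA r == k) = true := by simpa using hk
            simp [hk]
          · have hk' : (pvKeyA r == k) = false := by simpa using hk
            simp [hk']
            exact fun h => absurd h.symm hk

-- B's single pass computes (last lasgo row, last moovies row, first dated row)
theorem foldl_stepB (group : List (List (String × Option String)))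
    (s : Option (List (String × Option String)) × Option (List (String × Option String)) × Option (List (String × Option String))) :
    group.foldl pvStepB s
      = ((group.reverse.find? (fun r => pvKeyB r == "lasgo")).or s.1,
         (group.reverse.find? (fun r => pvKeyB r == "moovies")).or s.2.1,
         s.2.2.or (group.find? (fun r => pvTruthyB (pvDateB r)))) := by
  induction group generalizing s with
  | nil => simp
  | cons r rest ih =>
      simp only [List.foldl_cons, List.reverse_cons, List.find?_append, List.find?_cons, ih]
      unfold pvStepB
      by_cases hl : pvKeyB r = "lasgo" <;> by_cases hm : pvKeyB r = "moovies" <;>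
        (try (exact absurd (hl ▸ hm) (by decide))) <;>
        (first
          | (have hl' : (pvKeyB r == "lasgo") = true := by simpa using hl)
          | (have hl' : (pvKeyB r == "lasgo") = false := by simpa using hl)) <;>
        (first
          | (have hm' : (pvKeyB r == "moovies") = true := by simpa using hm)
          | (have hm' : (pvKeyB r == "moovies") = false := by simpa using hm)) <;>
        cases hs : s.2.2 <;>
        cases ht : pvTruthyB (pvDateB r) <;>
        simp [hl, hm, hl', hm', hs]

theorem pvLoopA_eq_find (group : List (List (String × Option String))) :
    pvLoopA group = (group.find? (fun r => pvTruthyA (pvDateA r))).bind pvDateA := by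
  induction group with
  | nil => rfl
  | cons r rest ih =>
      simp only [pvLoopA, List.find?_cons]
      by_cases h : pvTruthyA (pvDateA r) = true <;> simp [h, ih]

-- ===== VERDICT (by name: the statement is the Claim_ definition above) =====
theorem pick_best_release_date_spec : Claim_equal_pick_best_release_date := by
  intro group _
  unfold Spec_pick_best_release_date pick_best_release_date pick_best_release_date_alt
  have hkey : pvKeyA = pvKeyB := funext pvKeyA_eq_pvKeyB
  have hdate : pvDateA = pvDateB := rfl
  have htr : pvTruthyA = pvTruthyB := rfl
  have hrow : pvRowTruthyA = pvRowOkB := rfl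
  simp only [dict_get?_eq_find_rev, pvLoopA_eq_find, PySem.Dict.get?_empty, Option.or_none]
  simp only [foldl_stepB, Option.none_or, Option.or_none, hkey, hdate, htr, hrow]
  cases group.find? (fun r => pvTruthyB (pvDateB r)) <;> rfl
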